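-- pv_equiv track=rewrite | github.com/justinmoon/vibe | src/vibe/openai_client.py | sanitize_branch_name
-- ===== SOURCE A (Python) =====
-- def sanitize_branch_name(name: str) -> str:
--     lowered = name.strip().lower()
--     lowered = lowered.lstrip("-_ ")
--     cleaned = []
--     previous_dash = False
--     for char in lowered:
--         if char.isalnum():
--             cleaned.append(char)
--             previous_dash = False
--         else:
--             if not previous_dash:
--                 cleaned.append("-")
--             previous_dash = True
--     sanitized = "".join(cleaned).strip("-")
--     return sanitized
-- ===== SOURCE B (Python) =====
-- def sanitize_branch_name(name: str) -> str:
--     lowered = name.strip().lower()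
--     mapped = "".join(c if c.isalnum() else "-" for c in lowered)
--     return "-".join(p for p in mapped.split("-") if p)
-- ===== Notes on version B (the rewrite author's own statement) =====
-- stated objective: alternative
-- what changed: Replaces the previous_dash state-flag single pass plus the final dash strip (and the redundant extra lstrip) with a stateless map of every non-alphanumeric char to a dash, then a split on dashes, dropping empty pieces, and a dash join.
import Mathlib
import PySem

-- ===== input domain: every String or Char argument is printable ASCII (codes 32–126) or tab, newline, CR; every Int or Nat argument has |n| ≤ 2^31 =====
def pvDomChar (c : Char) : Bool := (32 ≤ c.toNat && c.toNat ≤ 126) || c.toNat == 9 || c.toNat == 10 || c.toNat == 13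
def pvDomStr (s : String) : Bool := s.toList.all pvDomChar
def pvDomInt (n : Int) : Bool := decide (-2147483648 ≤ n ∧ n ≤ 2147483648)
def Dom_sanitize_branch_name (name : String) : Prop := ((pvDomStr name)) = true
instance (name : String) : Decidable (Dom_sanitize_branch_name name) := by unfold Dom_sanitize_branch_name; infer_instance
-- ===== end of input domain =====

-- B replaces A's previous_dash state-flag pass plus final dash strip with a stateless
-- map-to-dash / split-on-dash / drop-empties / join decomposition; same cost, no speed claim.

-- ===== PORT A =====
-- the lstrip with explicit chars is ported by hand as dropWhile over the stripped chars
-- (exact: Python's str.lstrip(chars) removes exactly the leading characters in the set).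
def sanitize_branch_name (name : String) : String :=
  let lowered := PySem.Str.lower (PySem.Str.strip name)
  let lowered2 := lowered.toList.dropWhile (fun c => c == '-' || c == '_' || c == ' ')
  let r := lowered2.foldl
    (fun (st : List Char × Bool) c =>
      if PySem.Chars.isalnum c then (st.1 ++ [c], false)
      else if !st.2 then (st.1 ++ ['-'], true) else (st.1, true))
    ([], false)
  String.ofList (PySem.Chars.stripChars r.1 ['-'])

-- ===== PORT B =====
def sanitize_branch_name_alt (name : String) : String :=
  let lowered := PySem.Str.lower (PySem.Str.strip name)
  let mapped := lowered.toList.map (fun c => if PySem.Chars.isalnum c then c else '-')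
  let parts := PySem.Chars.splitOn mapped ['-']
  String.ofList (PySem.Chars.join ['-'] (parts.filter (fun p => !p.isEmpty)))

-- ===== PRECONDITION & SPEC =====
def Spec_sanitize_branch_name (name : String) (out : String) : Prop := out = sanitize_branch_name_alt name
instance (name : String) (out : String) : Decidable (Spec_sanitize_branch_name name out) := by unfold Spec_sanitize_branch_name; infer_instance

-- ===== CLAIM (what is proved, stated in full; the proofs are below) =====
def Claim_equal_sanitize_branch_name : Prop := ∀ (name : String), Dom_sanitize_branch_name name → Spec_sanitize_branch_name name (sanitize_branch_name name)

-- ===== LEMMAS AND PROOFS =====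

-- A's loop as a structural recursion (output suffix produced from state flag b).
def pvF : List Char → Bool → List Char
  | [], _ => []
  | c :: cs, b =>
    if PySem.Chars.isalnum c then c :: pvF cs false
    else if !b then '-' :: pvF cs true else pvF cs true

-- single-char split with an accumulator (the shape splitOn.go reduces to for sep = ['-']).
def pvSplit1 : List Char → List Char → List (List Char)
  | cur, [] => [cur.reverse]
  | cur, c :: rest =>
    if c == '-' then cur.reverse :: pvSplit1 [] rest else pvSplit1 (c :: cur) rest

-- the maximal alphanumeric runs of a char list
def pvRuns : List Char → List (List Char)
  | [] => []
  | c :: cs =>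
    if PySem.Chars.isalnum c then
      (c :: cs.takeWhile PySem.Chars.isalnum) :: pvRuns (cs.dropWhile PySem.Chars.isalnum)
    else pvRuns cs
termination_by cs => cs.length
decreasing_by
  · exact Nat.lt_succ_of_le (cs.length_dropWhile_le _)
  · exact Nat.lt_succ_self _

def pvRstrip (xs : List Char) : List Char :=
  (xs.reverse.dropWhile (fun c => c == '-')).reverse

lemma pvF_fold (cs : List Char) : ∀ (out : List Char) (b : Bool),
    (cs.foldl
      (fun (st : List Char × Bool) c =>
        if PySem.Chars.isalnum c then (st.1 ++ [c], false)
        else if !st.2 then (st.1 ++ ['-'], true) else (st.1, true))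
      (out, b)).1 = out ++ pvF cs b := by
  induction cs with
  | nil => intro out b; simp [pvF]
  | cons c cs ih =>
    intro out b
    rw [List.foldl_cons]
    by_cases h : PySem.Chars.isalnum c
    · dsimp only
      rw [if_pos h, ih]
      simp [pvF, h]
    · cases b <;> dsimp only <;> rw [if_neg h] <;>
        simp only [Bool.not_false, Bool.not_true, if_true] <;> rw [ih] <;> simp [pvF, h]

lemma pvGo_split1 (cs : List Char) : ∀ (fuel : Nat) (cur : List Char) (acc : List (List Char)),
    cs.length ≤ fuel →
    PySem.Chars.splitOn.go ['-'] fuel cs cur acc = acc.reverse ++ pvSplit1 cur cs := by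
  induction cs with
  | nil =>
    intro fuel cur acc _
    cases fuel <;> simp [PySem.Chars.splitOn.go, pvSplit1]
  | cons c rest ih =>
    intro fuel cur acc hf
    cases fuel with
    | zero => simp at hf
    | succ fuel =>
      by_cases h : c = '-'
      · subst h
        have hpre : List.isPrefixOf ['-'] ('-' :: rest) = true := by
          simp [List.isPrefixOf]
        simp only [PySem.Chars.splitOn.go, hpre, if_pos]
        rw [show List.drop (['-'] : List Char).length ('-' :: rest) = rest from rfl]
        rw [ih fuel [] (cur.reverse :: acc) (by simpa using Nat.le_of_succ_le_succ hf)]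
        simp [pvSplit1]
      · have hpre : List.isPrefixOf ['-'] (c :: rest) = false := by
          simp [List.isPrefixOf]
          exact fun hc => absurd hc.symm h
        simp only [PySem.Chars.splitOn.go, hpre, Bool.false_eq_true, if_neg, not_false_iff]
        rw [ih fuel (c :: cur) acc (by simpa using Nat.le_of_succ_le_succ hf)]
        simp [pvSplit1, h]

lemma pvSplitOn_eq (m : List Char) : PySem.Chars.splitOn m ['-'] = pvSplit1 [] m := by
  unfold PySem.Chars.splitOn
  simpa using pvGo_split1 m (m.length + 1) [] [] (Nat.le_succ _)

-- alphanumeric characters are never '-'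
lemma pvAlnum_ne_dash {c : Char} (h : PySem.Chars.isalnum c = true) : (c == '-') = false := by
  have hne : ¬ c = '-' := by
    intro e
    subst e
    simp [PySem.Chars.isalnum, PySem.Chars.isalpha, PySem.Chars.isdigit,
      PySem.Chars.isupper, PySem.Chars.islower] at h
  simpa using hne

-- the filtered single-char split of the mapped chars is exactly the runs
lemma pvSplit1_runs (cs : List Char) : ∀ (cur : List Char),
    (pvSplit1 cur (cs.map (fun c => if PySem.Chars.isalnum c then c else '-'))).filter
        (fun p => !p.isEmpty) =
      (if cur.isEmpty then pvRuns cs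
       else (cur.reverse ++ cs.takeWhile PySem.Chars.isalnum) ::
         pvRuns (cs.dropWhile PySem.Chars.isalnum)) := by
  induction cs with
  | nil =>
    intro cur
    cases cur <;> simp [pvSplit1, pvRuns, List.filter]
  | cons c cs ih =>
    intro cur
    by_cases h : PySem.Chars.isalnum c
    · have hnd := pvAlnum_ne_dash h
      simp only [List.map_cons, h, if_pos, pvSplit1, hnd, Bool.false_eq_true, if_neg,
        not_false_iff]
      rw [ih (c :: cur)]
      cases cur with
      | nil => simp [pvRuns, h]
      | cons a t => simp [h]
    · simp only [List.map_cons, h, Bool.false_eq_true, if_neg, not_false_iff, pvSplit1,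
        beq_self_eq_true, if_pos]
      rw [List.filter_cons, ih []]
      cases cur with
      | nil =>
        rw [pvRuns, if_neg h]
        simp
      | cons a t =>
        rw [pvRuns, if_neg h]
        simp [List.takeWhile_cons_of_neg h, List.dropWhile_cons_of_neg h, pvRuns, h]

-- every run is nonempty and fully alphanumeric
lemma pvRuns_sound (cs : List Char) : ∀ r ∈ pvRuns cs, r ≠ [] ∧ ∀ x ∈ r, PySem.Chars.isalnum x = true := by
  induction cs using pvRuns.induct with
  | case1 => simp [pvRuns]
  | case2 c cs h ih =>
    intro r hr
    rw [pvRuns, if_pos h] at hr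
    rcases List.mem_cons.mp hr with rfl | hr
    · refine ⟨by simp, ?_⟩
      intro x hx
      rcases List.mem_cons.mp hx with rfl | hx
      · exact h
      · exact List.mem_takeWhile_imp hx
    · exact ih r hr
  | case3 c cs h ih =>
    rw [pvRuns, if_neg h]
    exact ih

lemma pvRuns_cons_nonalnum {c : Char} (cs : List Char)
    (h : ¬ PySem.Chars.isalnum c = true) : pvRuns (c :: cs) = pvRuns cs := by
  rw [pvRuns, if_neg h]

lemma pvRuns_cons_alnum {c : Char} (cs : List Char)
    (h : PySem.Chars.isalnum c = true) :
    pvRuns (c :: cs) =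
      (c :: cs.takeWhile PySem.Chars.isalnum) :: pvRuns (cs.dropWhile PySem.Chars.isalnum) := by
  rw [pvRuns, if_pos h]

lemma pvRuns_nil_all (cs : List Char) :
    pvRuns cs = [] → ∀ x ∈ cs, PySem.Chars.isalnum x = false := by
  induction cs using pvRuns.induct with
  | case1 => simp
  | case2 c cs h ih => intro hr; rw [pvRuns, if_pos h] at hr; simp at hr
  | case3 c cs h ih =>
    intro hr x hx
    rw [pvRuns, if_neg h] at hr
    rcases List.mem_cons.mp hx with rfl | hx
    · simpa using h
    · exact ih hr x hx

lemma pvRuns_dropWhile (L : List Char) :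
    pvRuns (L.dropWhile (fun c => c == '-' || c == '_' || c == ' ')) = pvRuns L := by
  induction L with
  | nil => rfl
  | cons c cs ih =>
    by_cases h : (c == '-' || c == '_' || c == ' ') = true
    · rw [List.dropWhile_cons, if_pos h, ih, pvRuns_cons_nonalnum]
      intro halnum
      have : c = '-' ∨ c = '_' ∨ c = ' ' := by simpa [or_assoc] using h
      rcases this with rfl | rfl | rfl <;> simp_all [PySem.Chars.isalnum,
        PySem.Chars.isalpha, PySem.Chars.isdigit, PySem.Chars.isupper, PySem.Chars.islower]
    · rw [List.dropWhile_cons, if_neg h]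

-- pvF with flag true starts with an alphanumeric character (or is empty)
lemma pvF_true_head (cs : List Char) :
    pvF cs true = [] ∨ ∃ a t, pvF cs true = a :: t ∧ PySem.Chars.isalnum a = true := by
  induction cs with
  | nil => left; rfl
  | cons c cs ih =>
    by_cases h : PySem.Chars.isalnum c
    · right; exact ⟨c, pvF cs false, by simp [pvF, h], h⟩
    · simpa [pvF, h] using ih

lemma pvF_all_nonalnum (cs : List Char)
    (h : ∀ x ∈ cs, PySem.Chars.isalnum x = false) : pvF cs true = [] := by
  induction cs with
  | nil => rfl
  | cons c cs ih =>
    have hc := h c (List.mem_cons_self ..)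
    simp only [pvF, hc, Bool.false_eq_true, if_neg, not_false_iff, Bool.not_true]
    exact ih fun x hx => h x (List.mem_cons_of_mem _ hx)

-- pvF false = optional leading dash ++ pvF true
lemma pvF_false (cs : List Char) :
    pvF cs false =
      (match cs with
       | [] => []
       | c :: _ => if PySem.Chars.isalnum c then [] else ['-']) ++ pvF cs true := by
  cases cs with
  | nil => rfl
  | cons c t => by_cases h : PySem.Chars.isalnum c <;> simp [pvF, h]

lemma pvRstrip_cons_nondash {c : Char} (xs : List Char) (h : (c == '-') = false) :
    pvRstrip (c :: xs) = c :: pvRstrip xs := by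
  unfold pvRstrip
  rw [List.reverse_cons, List.dropWhile_append]
  by_cases he : (xs.reverse.dropWhile (fun c => c == '-')).isEmpty = true
  · rw [if_pos he]
    have hnil : xs.reverse.dropWhile (fun c => c == '-') = [] := List.isEmpty_iff.mp he
    rw [List.dropWhile_cons, if_neg (by simp [h])]
    simp [hnil]
  · rw [if_neg he]
    simp

lemma pvRstrip_cons_of_ne_nil {d : Char} (xs : List Char) (h : pvRstrip xs ≠ []) :
    pvRstrip (d :: xs) = d :: pvRstrip xs := by
  unfold pvRstrip at *
  rw [List.reverse_cons, List.dropWhile_append]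
  by_cases he : (xs.reverse.dropWhile (fun c => c == '-')).isEmpty = true
  · exact absurd (by simp [List.isEmpty_iff.mp he]) h
  · rw [if_neg he]
    simp

-- a nonempty first run gives a nonempty join
lemma pvJoin_runs_ne_nil (cs : List Char) (h : pvRuns cs ≠ []) :
    PySem.Chars.join ['-'] (pvRuns cs) ≠ [] := by
  rcases hr : pvRuns cs with _ | ⟨r, rr⟩
  · exact absurd hr h
  · have hr1 : r ≠ [] := ((pvRuns_sound cs r (hr ▸ List.mem_cons_self ..)).1)
    cases rr with
    | nil => simpa [PySem.Chars.join_singleton] using hr1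
    | cons q qq =>
      rw [PySem.Chars.join_cons_cons]
      simp [hr1]

-- core lemma: right-stripping A's flag-true output gives the dash-joined runs
lemma pvRstrip_F_true (cs : List Char) :
    pvRstrip (pvF cs true) = PySem.Chars.join ['-'] (pvRuns cs) := by
  induction cs with
  | nil => simp [pvF, pvRuns, pvRstrip, PySem.Chars.join_nil]
  | cons c cs ih =>
    by_cases h : PySem.Chars.isalnum c
    · -- pvF (c::cs) true = c :: pvF cs false
      have hstep : pvF (c :: cs) true = c :: pvF cs false := by simp [pvF, h]
      rw [hstep, pvRstrip_cons_nondash _ (pvAlnum_ne_dash h), pvF_false]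
      cases cs with
      | nil =>
        simp [pvRuns, h, pvF, pvRstrip, PySem.Chars.join_singleton]
      | cons d t =>
        by_cases hd : PySem.Chars.isalnum d
        · -- run continues
          simp only [hd, if_pos, List.nil_append]
          rw [ih]
          rw [pvRuns_cons_alnum _ h, List.takeWhile_cons_of_pos hd, List.dropWhile_cons_of_pos hd]
          rw [pvRuns_cons_alnum _ hd]
          cases hrr : pvRuns (t.dropWhile PySem.Chars.isalnum) with
          | nil => simp [PySem.Chars.join_singleton]
          | cons q qq => rw [PySem.Chars.join_cons_cons, PySem.Chars.join_cons_cons]; simp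
        · -- boundary after c
          simp only [hd, Bool.false_eq_true, if_neg, not_false_iff, List.singleton_append]
          rw [pvRuns_cons_alnum _ h, List.takeWhile_cons_of_neg hd, List.dropWhile_cons_of_neg hd]
          by_cases hrn : pvRuns (d :: t) = []
          · have hall := pvRuns_nil_all (d :: t) hrn
            rw [pvF_all_nonalnum _ hall, hrn]
            simp [pvRstrip, PySem.Chars.join_singleton]
          · have hjn := pvJoin_runs_ne_nil (d :: t) hrn
            rw [pvRstrip_cons_of_ne_nil _ (by rw [ih]; exact hjn), ih]
            rcases hr : pvRuns (d :: t) with _ | ⟨q, qq⟩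
            · exact absurd hr hrn
            · rw [PySem.Chars.join_cons_cons]; simp
    · have hstep : pvF (c :: cs) true = pvF cs true := by simp [pvF, h]
      rw [hstep, ih, pvRuns_cons_nonalnum _ h]

-- left-stripping dashes from pvF … false gives pvF … true
lemma pvDrop_F_false (cs : List Char) :
    (pvF cs false).dropWhile (fun c => c == '-') = pvF cs true := by
  have htrue : (pvF cs true).dropWhile (fun c => c == '-') = pvF cs true := by
    rcases pvF_true_head cs with h | ⟨a, t, h, ha⟩
    · simp [h]
    · rw [h, List.dropWhile_cons_of_neg (by simp [pvAlnum_ne_dash ha])]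
  rw [pvF_false]
  cases cs with
  | nil => rfl
  | cons c t =>
    by_cases h : PySem.Chars.isalnum c
    · simpa [h] using htrue
    · simp only [h, Bool.false_eq_true, if_neg, not_false_iff, List.singleton_append]
      rw [List.dropWhile_cons_of_pos (by simp)]
      exact htrue

lemma pvStripChars_eq (xs : List Char) :
    PySem.Chars.stripChars xs ['-'] =
      pvRstrip (xs.dropWhile (fun c => c == '-')) := by
  unfold PySem.Chars.stripChars pvRstrip
  have hp : (fun c => List.contains ['-'] c) = (fun c : Char => c == '-') := by
    funext c
    simp only [List.contains_cons, List.contains_nil, Bool.or_false]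
  rw [hp]

-- the whole list-level equivalence
lemma pvMain (L : List Char) :
    PySem.Chars.stripChars
      ((L.dropWhile (fun c => c == '-' || c == '_' || c == ' ')).foldl
        (fun (st : List Char × Bool) c =>
          if PySem.Chars.isalnum c then (st.1 ++ [c], false)
          else if !st.2 then (st.1 ++ ['-'], true) else (st.1, true))
        ([], false)).1 ['-'] =
    PySem.Chars.join ['-']
      ((PySem.Chars.splitOn (L.map (fun c => if PySem.Chars.isalnum c then c else '-')) ['-']).filter
        (fun p => !p.isEmpty)) := by
  set cs := L.dropWhile (fun c => c == '-' || c == '_' || c == ' ') with hcs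
  rw [pvF_fold cs [] false, List.nil_append, pvStripChars_eq, pvDrop_F_false, pvRstrip_F_true]
  rw [pvSplitOn_eq, pvSplit1_runs L []]
  simp only [List.isEmpty_nil, if_pos]
  rw [hcs, pvRuns_dropWhile]

-- ===== VERDICT (by name: the statement is the Claim_ definition above) =====
theorem sanitize_branch_name_spec : Claim_equal_sanitize_branch_name := by
  intro name _
  unfold Spec_sanitize_branch_name sanitize_branch_name sanitize_branch_name_alt
  exact congrArg String.ofList (pvMain (PySem.Str.lower (PySem.Str.strip name)).toList)
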